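-- pv_equiv track=rewrite | github.com/mchhmje/AI-chat-system-via-email | python_bot.py | parse_thread_from_body
-- ===== SOURCE A (Python) =====
-- def parse_thread_from_body(full_body):
--     """
--     כאשר מייל מורכב משיחה של תגובות, הפונקציה מחלצת רשימה מסודרת של הפניות
--     """
--     if full_body == "[No text body found]" or full_body == "[Error decoding body]":
--         return full_body if type(full_body) == list else [full_body]
--
--     lines = full_body.splitlines()
--     conversation = []
--
--     current_block_lines = []
--     current_depth = 0
--
--     for line in lines:
--         stripped_line = line.lstrip() # מוריד רווחים בהתחלה
--
--         # ספירת כמה '>' יש בהתחלה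
--         depth = 0
--         for char in stripped_line:
--             if char == '>':
--                 depth += 1
--             else:
--                 break
--         clean_content = stripped_line[depth:].strip() # מנקים את החיצים מהטקסט עצמו
--
--         # התעלמות משורות "לכלוך" של כותרות מייל
--         if clean_content.startswith("On ") and "wrote:" in clean_content:
--             continue # מדלגים על שורת ה-"בתאריך X כתב:"
--         if clean_content == "":
--             continue # מדלגים על שורות ריקות לגמרי
--
--         if depth != current_depth: # אם העומק השתנה, סימן שעברנו להודעה אחרת בשרשור
--             if current_block_lines: # שומרים את מה שאספנו עד עכשיו
--                 full_msg = "\n".join(current_block_lines)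
--                 conversation.append(full_msg)
--             current_block_lines = [] # מאפסים ומתחילים בלוק חדש
--             current_depth = depth
--         current_block_lines.append(clean_content) # מוסיפים את השורה לבלוק הנוכחי
--
--     if current_block_lines: # לא לשכוח לשמור את הבלוק האחרון שנשאר בסוף הלולאה
--         full_msg = "\n".join(current_block_lines)
--         conversation.append(full_msg)
--
--     conversation_order = list(reversed(conversation)) # ה-AI צריך לקרוא מהעבר להווה (2, 1, 0).
--     return conversation_order
-- ===== SOURCE B (Python) =====
-- def parse_thread_from_body(full_body):
--     if full_body == "[No text body found]" or full_body == "[Error decoding body]":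
--         return [full_body]
--     conversation = []          # built directly in final (oldest-first) order
--     block = None               # (depth, text) of the block being grown upward
--     for line in reversed(full_body.splitlines()):
--         stripped = line.lstrip()
--         depth = 0
--         while depth < len(stripped) and stripped[depth] == '>':
--             depth += 1
--         clean = stripped[depth:].strip()
--         if not clean or (clean.startswith("On ") and "wrote:" in clean):
--             continue
--         if block is not None and block[0] == depth:
--             block = (depth, clean + "\n" + block[1])   # prepend: lines stay in original order
--         else:
--             if block is not None:
--                 conversation.append(block[1])
--             block = (depth, clean)
--     if block is not None:
--         conversation.append(block[1])
--     return conversation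
-- ===== Notes on version B (the rewrite author's own statement) =====
-- stated objective: alternative
-- what changed: B traverses the lines in REVERSE order with a single (depth, text) open-block accumulator, prepending each kept line's text to the current block via string concatenation and emitting finished blocks directly in final oldest-first order, so A's intermediate conversation list, its final reversal pass and its per-block list-of-lines joined at flush time all disappear; depth is counted with an index while-loop.
import Mathlib
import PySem

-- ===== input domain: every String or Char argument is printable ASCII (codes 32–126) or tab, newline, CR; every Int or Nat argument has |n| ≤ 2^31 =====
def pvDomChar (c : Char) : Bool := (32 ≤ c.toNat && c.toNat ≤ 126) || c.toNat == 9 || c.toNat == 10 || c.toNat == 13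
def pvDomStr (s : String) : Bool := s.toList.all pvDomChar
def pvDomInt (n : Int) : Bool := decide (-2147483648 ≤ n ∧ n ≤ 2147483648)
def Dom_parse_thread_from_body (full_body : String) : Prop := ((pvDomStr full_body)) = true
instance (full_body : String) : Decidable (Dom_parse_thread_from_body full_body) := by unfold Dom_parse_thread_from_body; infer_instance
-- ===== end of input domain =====

-- B walks the lines in reverse with a single open-block string accumulator, emitting blocks directly in final order (objective: alternative decomposition, same cost).

-- ===== PORT A =====
-- the inner 'for char in stripped_line: if char == '>': depth += 1 else: break' loop
def pvDepthA : List Char → Nat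
  | [] => 0
  | c :: cs => if c = '>' then pvDepthA cs + 1 else 0

-- one iteration of A's main for-loop; state = (conversation, current_block_lines, current_depth)
def pvStepA (st : List String × List String × Nat) (line : String) : List String × List String × Nat :=
  let conversation := st.1
  let current_block_lines := st.2.1
  let current_depth := st.2.2
  let stripped := (PySem.Str.lstrip line).toList
  let depth := pvDepthA stripped
  let clean := PySem.Chars.strip (PySem.List.slice stripped (some (depth : Int)) none)
  if PySem.Chars.startswith clean "On ".toList = true ∧ PySem.Chars.isIn "wrote:".toList clean = true then st
  else if clean = [] then st
  else if depth ≠ current_depth then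
    ((if current_block_lines ≠ [] then conversation ++ [PySem.Str.join "\n" current_block_lines] else conversation),
     [String.ofList clean], depth)
  else (conversation, current_block_lines ++ [String.ofList clean], current_depth)

def parse_thread_from_body (full_body : String) : List String :=
  if full_body = "[No text body found]" ∨ full_body = "[Error decoding body]" then [full_body]
  else
    let lines := PySem.Str.splitlines full_body
    let st := lines.foldl pvStepA ([], [], 0)
    let conversation := if st.2.1 ≠ [] then st.1 ++ [PySem.Str.join "\n" st.2.1] else st.1
    conversation.reverse

-- ===== PORT B =====
-- Source B's 'while depth < len(stripped) and stripped[depth] == '>': depth += 1'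
def pvDepthB (cs : List Char) (depth : Nat) : Nat :=
  if h : depth < cs.length then
    if cs[depth] = '>' then pvDepthB cs (depth + 1) else depth
  else depth
  termination_by cs.length - depth
  decreasing_by omega

-- one iteration of Source B's reversed-lines loop; state = (conversation, open block as (depth, text))
def pvStepB (st : List String × Option (Nat × String)) (line : String) : List String × Option (Nat × String) :=
  let stripped := (PySem.Str.lstrip line).toList
  let depth := pvDepthB stripped 0
  let clean := PySem.Chars.strip (PySem.List.slice stripped (some (depth : Int)) none)
  if clean = [] ∨ (PySem.Chars.startswith clean "On ".toList = true ∧ PySem.Chars.isIn "wrote:".toList clean = true) then st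
  else match st.2 with
    | some (d, t) =>
        if d = depth then (st.1, some (depth, String.ofList clean ++ "\n" ++ t))
        else (st.1 ++ [t], some (depth, String.ofList clean))
    | none => (st.1, some (depth, String.ofList clean))

def parse_thread_from_body_alt (full_body : String) : List String :=
  if full_body = "[No text body found]" ∨ full_body = "[Error decoding body]" then [full_body]
  else
    let st := ((PySem.Str.splitlines full_body).reverse).foldl pvStepB ([], none)
    match st.2 with
    | some (_, t) => st.1 ++ [t]
    | none => st.1

-- ===== PRECONDITION & SPEC =====
def Spec_parse_thread_from_body (full_body : String) (out : List String) : Prop := out = parse_thread_from_body_alt full_body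
instance (full_body : String) (out : List String) : Decidable (Spec_parse_thread_from_body full_body out) := by unfold Spec_parse_thread_from_body; infer_instance

-- ===== CLAIM (what is proved, stated in full; the proofs are below) =====
def Claim_equal_parse_thread_from_body : Prop := ∀ (full_body : String), Dom_parse_thread_from_body full_body → Spec_parse_thread_from_body full_body (parse_thread_from_body full_body)

-- ===== LEMMAS AND PROOFS =====

-- the filtered (depth, clean) item of one line, none if the line is skipped (proof-level spec shared by both ports)
def pvItem (line : String) : Option (Nat × String) :=
  let stripped := (PySem.Str.lstrip line).toList
  let depth := pvDepthA stripped
  let clean := PySem.Chars.strip (PySem.List.slice stripped (some (depth : Int)) none)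
  if clean ≠ [] ∧ ¬(PySem.Chars.startswith clean "On ".toList = true ∧ PySem.Chars.isIn "wrote:".toList clean = true)
  then some (depth, String.ofList clean) else none

-- A's per-line step on a kept item
def pvStepP (st : List String × List String × Nat) (p : Nat × String) : List String × List String × Nat :=
  if p.1 ≠ st.2.2 then
    ((if st.2.1 ≠ [] then st.1 ++ [PySem.Str.join "\n" st.2.1] else st.1), [p.2], p.1)
  else (st.1, st.2.1 ++ [p.2], st.2.2)

-- B's per-line step on a kept item
def pvStepQ (st : List String × Option (Nat × String)) (p : Nat × String) : List String × Option (Nat × String) :=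
  match st.2 with
  | some (d, t) =>
      if d = p.1 then (st.1, some (p.1, p.2 ++ "\n" ++ t))
      else (st.1 ++ [t], some (p.1, p.2))
  | none => (st.1, some (p.1, p.2))

-- reference grouping of the filtered pairs into joined blocks, in original order
def pvGroup : List (Nat × String) → List String
  | [] => []
  | (d, c) :: rest =>
    PySem.Str.join "\n" (c :: (rest.takeWhile (fun p => p.1 = d)).map (·.2)) ::
      pvGroup (rest.dropWhile (fun p => p.1 = d))
  termination_by ps => ps.length
  decreasing_by simpa using Nat.lt_succ_of_le (List.length_dropWhile_le _ _)

-- flush A's final open block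
def pvFin (st : List String × List String × Nat) : List String :=
  if st.2.1 ≠ [] then st.1 ++ [PySem.Str.join "\n" st.2.1] else st.1

theorem strJoin_singleton (c : String) : PySem.Str.join "\n" [c] = c := by
  apply String.toList_inj.mp
  simp [PySem.Str.toList_join, PySem.Chars.join_singleton]

theorem strJoin_cons_cons (c c' : String) (l : List String) :
    PySem.Str.join "\n" (c :: c' :: l) = c ++ "\n" ++ PySem.Str.join "\n" (c' :: l) := by
  apply String.toList_inj.mp
  simp [PySem.Str.toList_join, PySem.Chars.join_cons_cons]

theorem pvDepthB_eq (cs : List Char) (d : Nat) :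
    pvDepthB cs d = d + pvDepthA (cs.drop d) := by
  fun_induction pvDepthB cs d with
  | case1 d h hgt ih =>
    rw [List.drop_eq_getElem_cons h, hgt, pvDepthA, ih]
    simp; omega
  | case2 d h hgt =>
    rw [List.drop_eq_getElem_cons h, pvDepthA]
    simp [hgt]
  | case3 d h =>
    rw [List.drop_eq_nil_of_le (by omega)]
    simp [pvDepthA]

theorem pvStepA_eq_item (st : List String × List String × Nat) (line : String) :
    pvStepA st line = (pvItem line).elim st (pvStepP st) := by
  simp only [pvStepA, pvItem]
  split_ifs <;> simp_all [Option.elim, pvStepP]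

theorem pvStepB_eq_item (st : List String × Option (Nat × String)) (line : String) :
    pvStepB st line = (pvItem line).elim st (pvStepQ st) := by
  simp only [pvStepB, pvItem, pvDepthB_eq, List.drop_zero, Nat.zero_add]
  split_ifs <;> simp_all [Option.elim, pvStepQ]

theorem pvFoldA_eq_foldP (lines : List String) (st : List String × List String × Nat) :
    lines.foldl pvStepA st = (lines.filterMap pvItem).foldl pvStepP st := by
  induction lines generalizing st with
  | nil => rfl
  | cons l ls ih =>
    rw [List.foldl_cons, pvStepA_eq_item]
    cases h : pvItem l with
    | none => simp [h, ih]
    | some p => simp [h, ih]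

theorem pvFoldB_eq_foldQ (lines : List String) (st : List String × Option (Nat × String)) :
    lines.foldl pvStepB st = (lines.filterMap pvItem).foldl pvStepQ st := by
  induction lines generalizing st with
  | nil => rfl
  | cons l ls ih =>
    rw [List.foldl_cons, pvStepB_eq_item]
    cases h : pvItem l with
    | none => simp [h, ih]
    | some p => simp [h, ih]

-- A's fold over an open block of depth cd merges the leading equal-depth run, then groups the rest
theorem pvFold_group (ps : List (Nat × String)) :
    ∀ conv cbl cd, cbl ≠ [] →
    pvFin (ps.foldl pvStepP (conv, cbl, cd)) =
      conv ++ (PySem.Str.join "\n" (cbl ++ (ps.takeWhile (fun p => p.1 = cd)).map (·.2)) ::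
               pvGroup (ps.dropWhile (fun p => p.1 = cd))) := by
  induction ps with
  | nil => intro conv cbl cd h; simp [pvFin, h, pvGroup]
  | cons p rest ih =>
    obtain ⟨d, c⟩ := p
    intro conv cbl cd h
    by_cases hd : d = cd
    · subst hd
      rw [List.foldl_cons]
      have hstep : pvStepP (conv, cbl, d) (d, c) = (conv, cbl ++ [c], d) := by
        simp [pvStepP]
      rw [hstep, ih conv (cbl ++ [c]) d (by simp)]
      simp [List.takeWhile, List.dropWhile]
    · rw [List.foldl_cons]
      have hstep : pvStepP (conv, cbl, cd) (d, c) =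
          (conv ++ [PySem.Str.join "\n" cbl], [c], d) := by
        simp [pvStepP, hd, h]
      rw [hstep, ih (conv ++ [PySem.Str.join "\n" cbl]) [c] d (by simp)]
      simp only [List.takeWhile_cons, List.dropWhile_cons]
      simp only [hd, decide_false, Bool.false_eq_true, if_false]
      rw [pvGroup]
      simp

theorem pvFin_eq_group (ps : List (Nat × String)) :
    pvFin (ps.foldl pvStepP ([], [], 0)) = pvGroup ps := by
  cases ps with
  | nil => simp [pvFin, pvGroup]
  | cons p rest =>
    obtain ⟨d, c⟩ := p
    have hstep : pvStepP ([], [], 0) (d, c) = ([], [c], d) := by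
      by_cases hd : d = 0 <;> simp [pvStepP, hd]
    rw [List.foldl_cons, hstep, pvFold_group rest [] [c] d (by simp), pvGroup]
    simp

-- B's foldr (= fold over the reversed pairs) keeps the earliest block open, finished groups reversed
theorem pvFoldrQ_cons (rest : List (Nat × String)) :
    ∀ d c,
    ((d, c) :: rest).foldr (fun p st => pvStepQ st p) ([], none) =
      ((pvGroup (rest.dropWhile (fun p => p.1 = d))).reverse,
       some (d, PySem.Str.join "\n" (c :: (rest.takeWhile (fun p => p.1 = d)).map (·.2)))) := by
  induction rest with
  | nil => intro d c; simp [pvStepQ, strJoin_singleton, pvGroup]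
  | cons p rest' ih =>
    obtain ⟨d', c'⟩ := p
    intro d c
    rw [List.foldr_cons, ih d' c']
    by_cases hd : d' = d
    · subst hd
      simp only [pvStepQ, if_pos]
      simp only [List.takeWhile_cons, List.dropWhile_cons]
      simp [strJoin_cons_cons]
    · simp only [pvStepQ]
      rw [if_neg hd]
      simp only [List.takeWhile_cons, List.dropWhile_cons]
      simp only [hd, decide_false, Bool.false_eq_true, if_false]
      rw [pvGroup]
      simp [strJoin_singleton]

theorem pvFoldrQ_eq_group (ps : List (Nat × String)) :
    (match (ps.foldr (fun p st => pvStepQ st p) ([], none)).2 with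
     | some (_, t) => (ps.foldr (fun p st => pvStepQ st p) ([], none)).1 ++ [t]
     | none => (ps.foldr (fun p st => pvStepQ st p) ([], none)).1) = (pvGroup ps).reverse := by
  cases ps with
  | nil => simp [pvGroup]
  | cons p rest =>
    obtain ⟨d, c⟩ := p
    rw [pvFoldrQ_cons rest d c]
    rw [pvGroup]
    simp

-- ===== VERDICT (by name: the statement is the Claim_ definition above) =====
theorem parse_thread_from_body_spec : Claim_equal_parse_thread_from_body := by
  intro full_body _
  unfold Spec_parse_thread_from_body parse_thread_from_body parse_thread_from_body_alt
  by_cases hg : full_body = "[No text body found]" ∨ full_body = "[Error decoding body]"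
  · simp [hg]
  · simp only [hg, if_false]
    rw [pvFoldA_eq_foldP, pvFoldB_eq_foldQ, List.filterMap_reverse, List.foldl_reverse]
    have hA := pvFin_eq_group ((PySem.Str.splitlines full_body).filterMap pvItem)
    unfold pvFin at hA
    rw [hA]
    exact (pvFoldrQ_eq_group ((PySem.Str.splitlines full_body).filterMap pvItem)).symm
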